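-- pv_equiv track=rewrite | github.com/jcrump612/Jack_Crump_Haverford_Thesis | energy.py | get_n_list
-- ===== SOURCE A (Python) =====
-- def get_n_list(n_max):
--     n_list=[]
--     for i in range(1,n_max+1):
--         for j in range(1,n_max+1):
--             for k in range(1,n_max+1):
--                 if [i,j,k] not in n_list and [i,k,j] not in n_list and [j,i,k] not in n_list and [j,k,i] not in n_list and [k,i,j] not in n_list and [k,j,i] not in n_list:
--                     n_list.append([i,j,k])
--     return n_list
-- ===== SOURCE B (Python) =====
-- def get_n_list(n_max):
--     def grow(lo, length):
--         if length == 0: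
--             return [[]]
--         return [[v] + rest for v in range(lo, n_max + 1) for rest in grow(v, length - 1)]
--     return grow(1, 3)
-- ===== Notes on version B (the rewrite author's own statement) =====
-- stated objective: faster
-- what changed: B builds the non-decreasing triples by structural recursion on the tuple length (each recursive call extends with values >= the last chosen one), instead of A's scan of all n^3 ordered triples with six linear membership tests against the accumulated list.
import Mathlib
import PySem

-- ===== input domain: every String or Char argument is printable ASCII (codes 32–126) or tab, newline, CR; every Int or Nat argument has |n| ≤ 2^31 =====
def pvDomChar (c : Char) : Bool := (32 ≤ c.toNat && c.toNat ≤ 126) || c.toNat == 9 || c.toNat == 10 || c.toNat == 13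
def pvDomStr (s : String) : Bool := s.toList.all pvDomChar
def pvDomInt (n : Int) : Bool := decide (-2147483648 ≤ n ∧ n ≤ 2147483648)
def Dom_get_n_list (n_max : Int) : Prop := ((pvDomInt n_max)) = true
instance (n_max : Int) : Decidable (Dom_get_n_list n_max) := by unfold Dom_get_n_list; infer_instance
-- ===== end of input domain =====

-- B builds the non-decreasing triples by structural recursion on the tuple length
-- (each recursive call extends with values ≥ the last chosen one), instead of A's
-- scan of all n³ ordered triples with six membership tests against the accumulated list.

-- ===== PORT A =====
def get_n_list (n_max : Int) : List (List Int) :=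
  (PySem.List.pyRange 1 (n_max + 1) 1).foldl (fun nl i =>
    (PySem.List.pyRange 1 (n_max + 1) 1).foldl (fun nl j =>
      (PySem.List.pyRange 1 (n_max + 1) 1).foldl (fun nl k =>
        if [i, j, k] ∉ nl ∧ [i, k, j] ∉ nl ∧ [j, i, k] ∉ nl ∧
           [j, k, i] ∉ nl ∧ [k, i, j] ∉ nl ∧ [k, j, i] ∉ nl
        then nl ++ [[i, j, k]] else nl) nl) nl) []

-- ===== PORT B =====
-- Source B's inner helper 'grow(lo, length)': recursion on the remaining tuple length
-- (a Nat, since grow is only called with lengths 3, 2, 1, 0).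
def pvGrow (n_max : Int) : Int → Nat → List (List Int)
  | _, 0 => [[]]
  | lo, l + 1 =>
      (PySem.List.pyRange lo (n_max + 1) 1).flatMap (fun v =>
        (pvGrow n_max v l).map (fun rest => v :: rest))

def get_n_list_alt (n_max : Int) : List (List Int) := pvGrow n_max 1 3

-- ===== PRECONDITION & SPEC =====
def Spec_get_n_list (n_max : Int) (out : List (List Int)) : Prop := out = get_n_list_alt n_max
instance (n_max : Int) (out : List (List Int)) : Decidable (Spec_get_n_list n_max out) := by unfold Spec_get_n_list; infer_instance

-- ===== CLAIM (what is proved, stated in full; the proofs are below) =====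
def Claim_equal_get_n_list : Prop := ∀ (n_max : Int), Dom_get_n_list n_max → Spec_get_n_list n_max (get_n_list n_max)

-- ===== LEMMAS AND PROOFS =====

-- Invariant states of A's triply nested loop, with N = n_max + 1 the exclusive bound.
-- pvC1 N i: everything appended before outer iteration i (all sorted triples with min < i).
def pvC1 (N i : Int) : List (List Int) :=
  (PySem.List.pyRange 1 i 1).flatMap (fun a =>
    (PySem.List.pyRange a N 1).flatMap (fun b =>
      (PySem.List.pyRange b N 1).map (fun c => [a, b, c])))

-- pvM N i j: triples appended during outer iteration i by middle indices b with i ≤ b < j.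
def pvM (N i j : Int) : List (List Int) :=
  (PySem.List.pyRange i j 1).flatMap (fun b =>
    (PySem.List.pyRange b N 1).map (fun c => [i, b, c]))

-- pvSt N i j k: A's accumulator just before processing inner index k of iteration (i, j).
def pvSt (N i j k : Int) : List (List Int) :=
  pvC1 N i ++ pvM N i j ++
    (if i ≤ j then (PySem.List.pyRange j k 1).map (fun c => [i, j, c]) else [])

-- A's accumulator just before processing middle index j of outer iteration i.
def pvMidSt (N i j : Int) : List (List Int) := pvC1 N i ++ pvM N i j

-- a fold over range(lo, hi) sends an invariant state S lo to S hi if each step advances S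
theorem pv_fold_inv {γ : Type} (f : γ → Int → γ) (S : Int → γ) (lo : Int) :
    ∀ (n : Nat), (∀ t, lo ≤ t → t < lo + (n : Int) → f (S t) t = S (t + 1)) →
      (PySem.List.pyRange lo (lo + (n : Int)) 1).foldl f (S lo) = S (lo + (n : Int)) := by
  intro n
  induction n with
  | zero =>
      intro _
      rw [show lo + ((0 : Nat) : Int) = lo by simp]
      rw [PySem.List.pyRange_one_eq_nil (le_refl lo)]
      rfl
  | succ m ih =>
      intro h
      have hsp : lo + ((m + 1 : Nat) : Int) = (lo + (m : Int)) + 1 := by push_cast; ring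
      rw [hsp, PySem.List.pyRange_one_succ_right (by omega : lo ≤ lo + (m : Int)),
        List.foldl_append]
      rw [ih (fun t ht ht' => h t ht (by omega))]
      simpa using h (lo + (m : Int)) (by omega) (by omega)

theorem pv_fold_inv' {γ : Type} (f : γ → Int → γ) (S : Int → γ) (lo hi : Int)
    (hle : lo ≤ hi) (h : ∀ t, lo ≤ t → t < hi → f (S t) t = S (t + 1)) :
    (PySem.List.pyRange lo hi 1).foldl f (S lo) = S hi := by
  obtain ⟨n, hn⟩ : ∃ n : Nat, hi = lo + (n : Int) := ⟨(hi - lo).toNat, by omega⟩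
  subst hn
  exact pv_fold_inv f S lo n h

-- membership in the invariant state: exactly the sorted in-range triples lexicographically
-- below position (i, j, k)
theorem pv_mem_pvSt (N i j k a b c : Int) (hi : 1 ≤ i) (hk : k ≤ N) :
    [a, b, c] ∈ pvSt N i j k ↔
      (1 ≤ a ∧ a ≤ b ∧ b ≤ c ∧ c < N ∧
        (a < i ∨ (a = i ∧ b < j) ∨ (a = i ∧ b = j ∧ i ≤ j ∧ j ≤ c ∧ c < k))) := by
  by_cases hij : i ≤ j
  · simp only [pvSt, pvC1, pvM, if_pos hij, List.mem_append, List.mem_flatMap, List.mem_map,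
      PySem.List.mem_pyRange_one, List.cons.injEq, and_true]
    constructor
    · rintro ((⟨x, hx, y, hy, z, hz, hxa, hyb, hzc⟩ | ⟨y, hy, z, hz, hia, hyb, hzc⟩) |
        ⟨z, hz, hia, hjb, hzc⟩) <;> subst_vars <;> omega
    · rintro ⟨h1, h2, h3, h4, (h5 | ⟨h5, h6⟩ | ⟨h5, h6, h7, h8, h9⟩)⟩
      · exact Or.inl (Or.inl ⟨a, ⟨by omega, by omega⟩, b, ⟨by omega, by omega⟩, c,
          ⟨by omega, by omega⟩, rfl, rfl, rfl⟩)
      · exact Or.inl (Or.inr ⟨b, ⟨by omega, by omega⟩, c, ⟨by omega, by omega⟩, by omega, rfl, rfl⟩)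
      · exact Or.inr ⟨c, ⟨by omega, by omega⟩, by omega, by omega, rfl⟩
  · simp only [pvSt, pvC1, pvM, if_neg hij, List.mem_append, List.mem_flatMap, List.mem_map,
      PySem.List.mem_pyRange_one, List.cons.injEq, and_true, List.not_mem_nil, or_false]
    constructor
    · rintro (⟨x, hx, y, hy, z, hz, hxa, hyb, hzc⟩ | ⟨y, hy, z, hz, hia, hyb, hzc⟩) <;>
        subst_vars <;> omega
    · rintro ⟨h1, h2, h3, h4, (h5 | ⟨h5, h6⟩ | ⟨h5, h6, h7, h8, h9⟩)⟩
      · exact Or.inl ⟨a, ⟨by omega, by omega⟩, b, ⟨by omega, by omega⟩, c,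
          ⟨by omega, by omega⟩, rfl, rfl, rfl⟩
      · exact Or.inr ⟨b, ⟨by omega, by omega⟩, c, ⟨by omega, by omega⟩, by omega, rfl, rfl⟩
      · omega

-- A's loop body appends [i,j,k] exactly when i ≤ j ≤ k, advancing the invariant state
theorem pv_stepA (N i j k : Int) (hi : 1 ≤ i) (hi2 : i < N) (hj : 1 ≤ j) (hj2 : j < N)
    (hk : 1 ≤ k) (hk2 : k < N) :
    (if [i, j, k] ∉ pvSt N i j k ∧ [i, k, j] ∉ pvSt N i j k ∧ [j, i, k] ∉ pvSt N i j k ∧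
        [j, k, i] ∉ pvSt N i j k ∧ [k, i, j] ∉ pvSt N i j k ∧ [k, j, i] ∉ pvSt N i j k
     then pvSt N i j k ++ [[i, j, k]] else pvSt N i j k) = pvSt N i j (k + 1) := by
  by_cases hc : i ≤ j ∧ j ≤ k
  · rw [if_pos]
    · unfold pvSt
      rw [if_pos hc.1, if_pos hc.1,
        PySem.List.pyRange_one_succ_right (by omega : j ≤ k), List.map_append]
      simp
    · refine ⟨?_, ?_, ?_, ?_, ?_, ?_⟩ <;>
        { intro hmem; rw [pv_mem_pvSt N i j k _ _ _ hi (by omega)] at hmem; omega }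
  · rw [if_neg]
    · unfold pvSt
      by_cases hij : i ≤ j
      · rw [if_pos hij, if_pos hij,
          PySem.List.pyRange_one_eq_nil (by omega : k ≤ j),
          PySem.List.pyRange_one_eq_nil (by omega : k + 1 ≤ j)]
      · rw [if_neg hij, if_neg hij]
    · intro hall
      obtain ⟨h1, h2, h3, h4, h5, h6⟩ := hall
      by_cases ha : j < i
      · by_cases hb : k ≤ j
        · exact h6 ((pv_mem_pvSt N i j k k j i hi (by omega)).mpr (by omega))
        · by_cases hcc : k ≤ i
          · exact h4 ((pv_mem_pvSt N i j k j k i hi (by omega)).mpr (by omega))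
          · exact h3 ((pv_mem_pvSt N i j k j i k hi (by omega)).mpr (by omega))
      · by_cases hb : k < i
        · exact h5 ((pv_mem_pvSt N i j k k i j hi (by omega)).mpr (by omega))
        · exact h2 ((pv_mem_pvSt N i j k i k j hi (by omega)).mpr (by omega))

theorem pv_st_one (N i j : Int) (hj : 1 ≤ j) : pvSt N i j 1 = pvMidSt N i j := by
  unfold pvSt pvMidSt
  by_cases hij : i ≤ j
  · rw [if_pos hij, PySem.List.pyRange_one_eq_nil (by omega : (1:Int) ≤ j)]
    simp
  · rw [if_neg hij]; simp

theorem pv_st_top (N i j : Int) (_hi : 1 ≤ i) (_hj : 1 ≤ j) :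
    pvSt N i j N = pvMidSt N i (j + 1) := by
  unfold pvSt pvMidSt pvM
  by_cases hij : i ≤ j
  · rw [if_pos hij, PySem.List.pyRange_one_succ_right (by omega : i ≤ j), List.flatMap_append]
    simp
  · rw [if_neg hij,
      PySem.List.pyRange_one_eq_nil (by omega : j ≤ i),
      PySem.List.pyRange_one_eq_nil (by omega : j + 1 ≤ i)]
    simp

theorem pv_mid_one (N i : Int) (hi : 1 ≤ i) : pvMidSt N i 1 = pvC1 N i := by
  unfold pvMidSt pvM
  rw [PySem.List.pyRange_one_eq_nil (by omega : (1:Int) ≤ i)]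
  simp

theorem pv_mid_top (N i : Int) (hi : 1 ≤ i) : pvMidSt N i N = pvC1 N (i + 1) := by
  unfold pvMidSt pvM pvC1
  rw [PySem.List.pyRange_one_succ_right (by omega : (1:Int) ≤ i), List.flatMap_append]
  simp

theorem pv_A_eq (n_max : Int) (hN : (1:Int) ≤ n_max + 1) :
    get_n_list n_max = pvC1 (n_max + 1) (n_max + 1) := by
  unfold get_n_list
  rw [show ([] : List (List Int)) = pvC1 (n_max + 1) 1 by
    unfold pvC1
    rw [PySem.List.pyRange_one_eq_nil (le_refl (1:Int))]
    simp]
  refine pv_fold_inv' _ (pvC1 (n_max + 1)) 1 (n_max + 1) hN ?_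
  intro i hi hi2
  show (PySem.List.pyRange 1 (n_max + 1) 1).foldl _ (pvC1 (n_max + 1) i) = _
  rw [← pv_mid_one (n_max + 1) i hi, ← pv_mid_top (n_max + 1) i hi]
  refine pv_fold_inv' _ (pvMidSt (n_max + 1) i) 1 (n_max + 1) hN ?_
  intro j hj hj2
  show (PySem.List.pyRange 1 (n_max + 1) 1).foldl _ (pvMidSt (n_max + 1) i j) = _
  rw [← pv_st_one (n_max + 1) i j hj, ← pv_st_top (n_max + 1) i j hi hj]
  refine pv_fold_inv' _ (pvSt (n_max + 1) i j) 1 (n_max + 1) hN ?_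
  intro k hk hk2
  exact pv_stepA (n_max + 1) i j k hi hi2 hj hj2 hk hk2

-- unfolding grow to depth 3 gives exactly the comprehension pvC1 N N
theorem pv_B_eq (n_max : Int) : get_n_list_alt n_max = pvC1 (n_max + 1) (n_max + 1) := by
  unfold get_n_list_alt pvC1
  simp only [pvGrow]
  simp [List.map_eq_flatMap, List.flatMap_assoc]

-- ===== VERDICT (by name: the statement is the Claim_ definition above) =====
theorem get_n_list_spec : Claim_equal_get_n_list := by
  intro n_max _
  unfold Spec_get_n_list
  by_cases hN : (1:Int) ≤ n_max + 1
  · rw [pv_A_eq n_max hN, pv_B_eq n_max]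
  · unfold get_n_list get_n_list_alt pvGrow
    rw [PySem.List.pyRange_one_eq_nil (by omega : n_max + 1 ≤ 1)]
    rfl
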